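-- pv_equiv track=rewrite | github.com/nghiphaam/Nexa | nexa/training/utils.py | _collect_explicit_cli_fields
-- ===== SOURCE A (Python) =====
-- def _collect_explicit_cli_fields(argv):
--     option_to_field = {
--         "--block-size": "block_size",
--         "--batch-size": "batch_size",
--         "--n-layer": "n_layer",
--         "--n-embd": "n_embd",
--         "--n-head": "n_head",
--         "--n-kv-head": "n_kv_head",
--         "--use-grad-ckpt": "use_grad_ckpt",
--         "--no-use-grad-ckpt": "use_grad_ckpt",
--         "--compile": "compile",
--         "--no-compile": "compile",
--     }
--     explicit_fields = set()
--     for token in argv: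
--         if not token.startswith("--"):
--             continue
--         field = option_to_field.get(token.split("=", 1)[0])
--         if field is not None:
--             explicit_fields.add(field)
--     return explicit_fields
-- ===== SOURCE B (Python) =====
-- def _collect_explicit_cli_fields(argv):
--     # Derive the config field from the option text itself (argparse-style dest
--     # derivation: drop "--", allow a "no-" negation for boolean flags, hyphens
--     # become underscores) and validate it against the known field names,
--     # instead of a literal option->field table.
--     flag_names = ["use-grad-ckpt", "compile"]  # booleans: --X and --no-X both set X
--     value_names = ["block-size", "batch-size", "n-layer", "n-embd", "n-head", "n-kv-head"]
--     explicit_fields = set()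
--     for token in argv:
--         if not token.startswith("--"):
--             continue
--         name = token.split("=", 1)[0][2:]
--         if name.startswith("no-") and name[3:] in flag_names:
--             name = name[3:]
--         if name in flag_names or name in value_names:
--             explicit_fields.add(name.replace("-", "_"))
--     return explicit_fields
-- ===== Notes on version B (the rewrite author's own statement) =====
-- stated objective: alternative
-- what changed: Replaces A's literal option->field dictionary lookup per token by deriving the field name from the option text itself (argparse-style dest derivation: strip '--', accept a 'no-' negation for the two boolean flags, map hyphens to underscores) and validating the derived name against the known field-name lists.
import Mathlib
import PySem

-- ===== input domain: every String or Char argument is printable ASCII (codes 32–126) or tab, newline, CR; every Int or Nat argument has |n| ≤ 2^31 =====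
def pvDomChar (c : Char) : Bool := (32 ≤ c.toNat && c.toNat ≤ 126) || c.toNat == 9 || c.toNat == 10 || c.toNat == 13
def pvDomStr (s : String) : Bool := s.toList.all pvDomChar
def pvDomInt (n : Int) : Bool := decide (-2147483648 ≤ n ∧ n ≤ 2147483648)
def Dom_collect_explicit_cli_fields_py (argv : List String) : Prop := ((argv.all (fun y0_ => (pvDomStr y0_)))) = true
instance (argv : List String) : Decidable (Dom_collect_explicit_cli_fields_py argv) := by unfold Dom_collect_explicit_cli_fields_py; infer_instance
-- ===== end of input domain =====

-- B derives the field name from the option text itself (argparse-style: drop "--", allow a "no-"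
-- negation for boolean flags, hyphens become underscores) and validates it against the known field
-- names, instead of looking each token up in a literal option→field table; alternative, same cost.

-- ===== PORT A =====
-- the dict literal option_to_field (keys distinct, insertion order)
def optionToField : PySem.Dict String String :=
  PySem.Dict.mk
  [("--block-size", "block_size"),
   ("--batch-size", "batch_size"),
   ("--n-layer", "n_layer"),
   ("--n-embd", "n_embd"),
   ("--n-head", "n_head"),
   ("--n-kv-head", "n_kv_head"),
   ("--use-grad-ckpt", "use_grad_ckpt"),
   ("--no-use-grad-ckpt", "use_grad_ckpt"),
   ("--compile", "compile"),
   ("--no-compile", "compile")]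

-- token.split("=", 1)[0]  (split never returns [], so [0] is its head); shared by both ports,
-- which contain this very expression verbatim
def splitHead (token : String) : String :=
  ((PySem.Str.splitMax? token "=" 1).getD []).headD ""

def collect_explicit_cli_fields_py (argv : List String) : List String :=
  argv.foldl (fun explicit_fields token =>
    if PySem.Str.startswith token "--" = false then explicit_fields
    else
      match PySem.Dict.get? optionToField (splitHead token) with
      | none => explicit_fields
      | some field => PySem.Set.add explicit_fields field) PySem.Set.empty

-- ===== PORT B =====
def flagNames : List String := ["use-grad-ckpt", "compile"]
def valueNames : List String := ["block-size", "batch-size", "n-layer", "n-embd", "n-head", "n-kv-head"]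

def collect_explicit_cli_fields_py_alt (argv : List String) : List String :=
  argv.foldl (fun explicit_fields token =>
    if PySem.Str.startswith token "--" = false then explicit_fields
    else
      -- name = token.split("=", 1)[0][2:]
      let name0 := PySem.Str.slice (splitHead token) (some 2) none
      -- if name.startswith("no-") and name[3:] in flag_names: name = name[3:]
      let name := if PySem.Str.startswith name0 "no-"
                     && flagNames.contains (PySem.Str.slice name0 (some 3) none)
                  then PySem.Str.slice name0 (some 3) none else name0
      if flagNames.contains name || valueNames.contains name
      then PySem.Set.add explicit_fields (PySem.Str.replace name "-" "_")
      else explicit_fields) PySem.Set.empty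

-- ===== PRECONDITION & SPEC =====
def Spec_collect_explicit_cli_fields_py (argv : List String) (out : List String) : Prop := out = collect_explicit_cli_fields_py_alt argv
instance (argv : List String) (out : List String) : Decidable (Spec_collect_explicit_cli_fields_py argv out) := by unfold Spec_collect_explicit_cli_fields_py; infer_instance

-- ===== CLAIM (what is proved, stated in full; the proofs are below) =====
def Claim_equal_collect_explicit_cli_fields_py : Prop := ∀ (argv : List String), Dom_collect_explicit_cli_fields_py argv → Spec_collect_explicit_cli_fields_py argv (collect_explicit_cli_fields_py argv)

-- ===== LEMMAS AND PROOFS =====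

-- the accumulator of splitOnMax.go is a prefix of the result
theorem pv_go_acc (sep : List Char) (fuel : Nat) : ∀ (m : Nat) (l cur : List Char) (acc : List (List Char)),
    PySem.Chars.splitOnMax.go sep fuel m l cur acc
      = acc.reverse ++ PySem.Chars.splitOnMax.go sep fuel m l cur [] := by
  induction fuel with
  | zero => intro m l cur acc; simp [PySem.Chars.splitOnMax.go]
  | succ n ih =>
    intro m l cur acc
    cases l with
    | nil => simp [PySem.Chars.splitOnMax.go]
    | cons c rest =>
      simp only [PySem.Chars.splitOnMax.go]
      by_cases hm : m = 0
      · simp [hm]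
      · by_cases hp : sep.isPrefixOf (c :: rest) = true
        · simp only [hm, if_false, hp, if_true]
          rw [ih _ _ _ (cur.reverse :: acc), ih _ _ _ [cur.reverse]]
          simp
        · have hp' : sep.isPrefixOf (c :: rest) = false := by
            cases h : sep.isPrefixOf (c :: rest)
            · rfl
            · exact absurd h hp
          simp only [hm, if_false, hp', Bool.false_eq_true]
          exact ih _ _ _ acc

-- the first piece of a '='-split is the maximal '='-free prefix
theorem pv_go_head (fuel : Nat) : ∀ (l cur : List Char) (m : Nat), l.length < fuel → m ≠ 0 →
    (PySem.Chars.splitOnMax.go ['='] fuel m l cur []).head?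
      = some (cur.reverse ++ l.takeWhile (fun c => c != '=')) := by
  induction fuel with
  | zero => intro l cur m hl; omega
  | succ n ih =>
    intro l cur m hl hm
    cases l with
    | nil => simp [PySem.Chars.splitOnMax.go]
    | cons c rest =>
      simp only [PySem.Chars.splitOnMax.go, hm, if_false]
      by_cases hc : c = '='
      · have hp : List.isPrefixOf ['='] (c :: rest) = true := by simp [hc, List.isPrefixOf]
        simp only [hp, if_true]
        rw [pv_go_acc]
        simp [hc]
      · have hp : List.isPrefixOf ['='] (c :: rest) = false := by
          simp [List.isPrefixOf]; exact fun h => absurd h.symm hc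
        simp only [hp, Bool.false_eq_true, if_false]
        rw [ih rest (c :: cur) m (by simpa using Nat.lt_of_succ_lt_succ hl) hm]
        simp [hc]

theorem pv_splitHead (t : String) :
    splitHead t = String.ofList (t.toList.takeWhile (fun c => c != '=')) := by
  unfold splitHead
  have h1 : ("=" : String).toList = ['='] := by decide
  rw [PySem.Str.splitMax?, h1, PySem.Chars.splitMax?]
  rw [if_neg (by decide : ¬ ((['='] : List Char).isEmpty = true))]
  rw [PySem.Chars.splitOnMax, if_neg (by omega : ¬ ((1:Int) < 0))]
  have h4 : (1 : Int).toNat = 1 := rfl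
  have hgo := pv_go_head (t.toList.length + 1) t.toList [] 1 (by omega) (by omega)
  simp only [Option.map_some, Option.getD_some, List.headD_eq_head?_getD, List.head?_map, h4, hgo]
  simp

-- String.ofList equality with a string literal, as a list fact
theorem pv_ofList_eq (l : List Char) (s : String) : (String.ofList l = s) ↔ l = s.toList := by
  rw [← String.toList_inj, String.toList_ofList]

-- get? on the literal dict, as an if-chain over the key
theorem pv_get?_opt (p : String) : PySem.Dict.get? optionToField p =
    if p = "--block-size" then some "block_size"
    else if p = "--batch-size" then some "batch_size"
    else if p = "--n-layer" then some "n_layer"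
    else if p = "--n-embd" then some "n_embd"
    else if p = "--n-head" then some "n_head"
    else if p = "--n-kv-head" then some "n_kv_head"
    else if p = "--use-grad-ckpt" then some "use_grad_ckpt"
    else if p = "--no-use-grad-ckpt" then some "use_grad_ckpt"
    else if p = "--compile" then some "compile"
    else if p = "--no-compile" then some "compile"
    else none := by
  simp only [optionToField, PySem.Dict.get?_mk_cons, beq_iff_eq]
  have hnil : (PySem.Dict.mk ([] : List (String × String))).get? p = none := rfl
  rw [hnil]
  simp only [eq_comm]

theorem pv_contains_flag (w : List Char) :
    flagNames.contains (String.ofList w)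
      = (decide (w = "use-grad-ckpt".toList) || decide (w = "compile".toList)) := by
  rw [Bool.eq_iff_iff]
  simp [flagNames, pv_ofList_eq]

theorem pv_contains_value (w : List Char) :
    valueNames.contains (String.ofList w)
      = (decide (w = "block-size".toList) || decide (w = "batch-size".toList)
         || decide (w = "n-layer".toList) || decide (w = "n-embd".toList)
         || decide (w = "n-head".toList) || decide (w = "n-kv-head".toList)) := by
  rw [Bool.eq_iff_iff]
  simp [valueNames, pv_ofList_eq, or_assoc]

theorem pv_startswith_no (w : List Char) :
    PySem.Str.startswith (String.ofList w) "no-" = List.isPrefixOf ['n','o','-'] w := by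
  simp [PySem.Str.startswith_eq, PySem.Chars.startswith]

theorem pv_slice_drop2 (l : List Char) :
    PySem.Str.slice (String.ofList l) (some 2) none = String.ofList (l.drop 2) := by
  simp [PySem.Str.slice, PySem.List.slice_from]

theorem pv_slice_drop3 (l : List Char) :
    PySem.Str.slice (String.ofList l) (some 3) none = String.ofList (l.drop 3) := by
  simp [PySem.Str.slice, PySem.List.slice_from]

theorem pv_key_ne (s : String) (l : List Char) (w : List Char) (hs : s.toList = '-' :: '-' :: l)
    (hne : ¬ w = l) : ¬ (String.ofList ('-' :: '-' :: w) = s) := by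
  intro h
  rw [pv_ofList_eq, hs] at h
  simp only [List.cons.injEq, true_and] at h
  exact hne h

-- a match over 'if c then some x else none' is an if
theorem pv_match_if (c : Bool) (x : String) (s : PySem.Set String) :
    (match (if c = true then some x else none) with
     | none => s
     | some field => PySem.Set.add s field)
      = (if c = true then PySem.Set.add s x else s) := by
  cases c <;> rfl

-- the per-token core: table lookup of "--"++name = name-derivation from the option text
theorem pv_core (w : List Char) :
    PySem.Dict.get? optionToField (String.ofList ('-' :: '-' :: w))
      = (let name0 := String.ofList w
         let name := if PySem.Str.startswith name0 "no-"
                        && flagNames.contains (PySem.Str.slice name0 (some 3) none)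
                     then PySem.Str.slice name0 (some 3) none else name0
         if flagNames.contains name || valueNames.contains name
         then some (PySem.Str.replace name "-" "_") else none) := by
  by_cases h1 : w = "block-size".toList
  · subst h1; decide
  by_cases h2 : w = "batch-size".toList
  · subst h2; decide
  by_cases h3 : w = "n-layer".toList
  · subst h3; decide
  by_cases h4 : w = "n-embd".toList
  · subst h4; decide
  by_cases h5 : w = "n-head".toList
  · subst h5; decide
  by_cases h6 : w = "n-kv-head".toList
  · subst h6; decide
  by_cases h7 : w = "use-grad-ckpt".toList
  · subst h7; decide
  by_cases h8 : w = "compile".toList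
  · subst h8; decide
  by_cases h9 : w = "no-use-grad-ckpt".toList
  · subst h9; decide
  by_cases h10 : w = "no-compile".toList
  · subst h10; decide
  -- no option matches: both sides give none
  rw [pv_get?_opt,
    if_neg (pv_key_ne _ _ _ (by decide) h1), if_neg (pv_key_ne _ _ _ (by decide) h2),
    if_neg (pv_key_ne _ _ _ (by decide) h3), if_neg (pv_key_ne _ _ _ (by decide) h4),
    if_neg (pv_key_ne _ _ _ (by decide) h5), if_neg (pv_key_ne _ _ _ (by decide) h6),
    if_neg (pv_key_ne _ _ _ (by decide) h7), if_neg (pv_key_ne _ _ _ (by decide) h9),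
    if_neg (pv_key_ne _ _ _ (by decide) h8), if_neg (pv_key_ne _ _ _ (by decide) h10)]
  by_cases hno : List.isPrefixOf ['n','o','-'] w = true
  · obtain ⟨v, rfl⟩ := List.isPrefixOf_iff_prefix.mp hno
    have hv1 : ¬ (v = "use-grad-ckpt".toList) := fun h => h9 (by subst h; decide)
    have hv2 : ¬ (v = "compile".toList) := fun h => h10 (by subst h; decide)
    have hsw : PySem.Str.startswith (String.ofList (['n','o','-'] ++ v)) "no-" = true := by
      rw [pv_startswith_no]
      exact List.isPrefixOf_iff_prefix.mpr ⟨v, rfl⟩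
    have hc : flagNames.contains
        (PySem.Str.slice (String.ofList (['n','o','-'] ++ v)) (some 3) none) = false := by
      rw [pv_slice_drop3]
      have hd : (['n','o','-'] ++ v).drop 3 = v := rfl
      rw [hd, pv_contains_flag, decide_eq_false hv1, decide_eq_false hv2]
      rfl
    dsimp only
    rw [hsw, hc]
    rw [show (true && false) = false from rfl, if_neg (by decide : ¬ (false = true))]
    rw [pv_contains_flag, pv_contains_value,
      decide_eq_false h7, decide_eq_false h8, decide_eq_false h1, decide_eq_false h2,
      decide_eq_false h3, decide_eq_false h4, decide_eq_false h5, decide_eq_false h6]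
    rfl
  · have hsw : PySem.Str.startswith (String.ofList w) "no-" = false := by
      rw [pv_startswith_no]
      exact Bool.eq_false_iff.mpr hno
    dsimp only
    rw [hsw, Bool.false_and, if_neg (by decide : ¬ (false = true))]
    rw [pv_contains_flag, pv_contains_value,
      decide_eq_false h7, decide_eq_false h8, decide_eq_false h1, decide_eq_false h2,
      decide_eq_false h3, decide_eq_false h4, decide_eq_false h5, decide_eq_false h6]
    rfl

theorem pv_body (s : PySem.Set String) (token : String) :
    (if PySem.Str.startswith token "--" = false then s
     else
       match PySem.Dict.get? optionToField (splitHead token) with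
       | none => s
       | some field => PySem.Set.add s field)
    = (if PySem.Str.startswith token "--" = false then s
       else
         let name0 := PySem.Str.slice (splitHead token) (some 2) none
         let name := if PySem.Str.startswith name0 "no-"
                        && flagNames.contains (PySem.Str.slice name0 (some 3) none)
                     then PySem.Str.slice name0 (some 3) none else name0
         if flagNames.contains name || valueNames.contains name
         then PySem.Set.add s (PySem.Str.replace name "-" "_")
         else s) := by
  by_cases hsw : PySem.Str.startswith token "--" = false
  · rw [if_pos hsw, if_pos hsw]
  · rw [if_neg hsw, if_neg hsw]
    have hsw' : PySem.Str.startswith token "--" = true := by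
      cases h : PySem.Str.startswith token "--"
      · exact absurd h hsw
      · rfl
    have hpre : ['-', '-'] <+: token.toList := by
      rw [PySem.Str.startswith_eq, show ("--" : String).toList = ['-', '-'] from by decide]
        at hsw'
      exact List.isPrefixOf_iff_prefix.mp hsw'
    obtain ⟨r, hr⟩ := hpre
    have hsh : splitHead token
        = String.ofList ('-' :: '-' :: r.takeWhile (fun c => c != '=')) := by
      rw [pv_splitHead, ← hr]
      simp
    rw [hsh, pv_slice_drop2]
    have hdrop : ('-' :: '-' :: r.takeWhile (fun c => c != '=')).drop 2
        = r.takeWhile (fun c => c != '=') := rfl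
    rw [hdrop, pv_core]
    dsimp only
    rw [pv_match_if]

-- ===== VERDICT (by name: the statement is the Claim_ definition above) =====
theorem collect_explicit_cli_fields_py_spec : Claim_equal_collect_explicit_cli_fields_py := by
  intro argv _
  show collect_explicit_cli_fields_py argv = collect_explicit_cli_fields_py_alt argv
  unfold collect_explicit_cli_fields_py collect_explicit_cli_fields_py_alt
  exact List.foldl_ext _ _ _ (fun s token _ => pv_body s token)
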